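-- pv_equiv track=rewrite | github.com/itxasos23/aoc_23 | python/days/day_12/day.py | _get_question_groups
-- ===== SOURCE A (Python) =====
-- def _get_question_groups(row):
--     group_starts = []
--     group_ends = []
--
--     if row[0] == "?":
--         group_starts.append(0)
--
--     for idx, char in enumerate(row):
--         if idx == 0:
--             continue
--         if char == "?" and row[idx - 1] != "?":
--             group_starts.append(idx - 1)
--
--         if char != "?" and row[idx - 1] == "?":
--             group_ends.append(idx - 1)
--
--     if row[-1] == "?":
--         group_ends.append(len(row) - 1)
--
--     str_groups = {}
--     for idx_0, idx_1 in zip(group_starts, group_ends):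
--         group = row[idx_0 : idx_1 + 2]
--
--         if group in str_groups:
--             str_groups[group] += 1
--         else:
--             str_groups[group] = 1
--
--     return str_groups
-- ===== SOURCE B (Python) =====
-- def _get_question_groups(row):
--     counts = {}
--     n = len(row)
--     i = 0
--     while i < n:
--         if row[i] == "?":
--             s = i
--             while i < n and row[i] == "?":
--                 i += 1
--             g = row[max(0, s - 1): i + 1]
--             counts[g] = counts.get(g, 0) + 1
--         else:
--             i += 1
--     return counts
-- ===== Notes on version B (the rewrite author's own statement) =====
-- stated objective: simpler
-- what changed: B finds each maximal run of question marks directly with a single two-pointer scan and slices one group string per run (with one context character on each side), instead of A's transition detection into two parallel start/end index lists that are zipped afterwards; counting uses dict.get instead of an in-test.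
import Mathlib
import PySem

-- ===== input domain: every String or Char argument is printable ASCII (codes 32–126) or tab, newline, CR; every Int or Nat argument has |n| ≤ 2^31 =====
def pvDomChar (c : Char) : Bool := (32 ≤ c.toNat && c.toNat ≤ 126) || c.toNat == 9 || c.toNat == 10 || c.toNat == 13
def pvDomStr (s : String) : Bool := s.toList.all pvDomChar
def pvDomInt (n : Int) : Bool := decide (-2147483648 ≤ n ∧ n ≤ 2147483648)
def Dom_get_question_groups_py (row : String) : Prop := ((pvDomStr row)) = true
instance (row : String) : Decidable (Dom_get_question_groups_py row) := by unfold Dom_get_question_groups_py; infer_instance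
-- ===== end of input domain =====

-- B replaces A's transition-detection into two parallel start/end index lists (zipped afterwards) by a
-- single run-finding scan that slices each maximal '?' run directly; same return value on nonempty rows.

-- ===== PORT A =====
-- the body of A's enumerate loop (state = (group_starts, group_ends))
def stepA (cs : List Char) (acc : List Int × List Int) (p : Int × Char) : List Int × List Int :=
  if p.1 = 0 then acc
  else
    let acc := if p.2 = '?' ∧ PySem.List.pyGetD cs (p.1 - 1) ' ' ≠ '?' then (acc.1 ++ [p.1 - 1], acc.2) else acc
    if p.2 ≠ '?' ∧ PySem.List.pyGetD cs (p.1 - 1) ' ' = '?' then (acc.1, acc.2 ++ [p.1 - 1]) else acc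

def get_question_groups_py (row : String) : List (String × Int) :=
  let cs := row.toList
  match PySem.List.pyGet? cs 0 with    -- first subscript: IndexError on the empty row (excluded by Pre_)
  | none => []
  | some c0 =>
    let gs0 : List Int := if c0 = '?' then [0] else []
    let se := (PySem.List.enumerate cs 0).foldl (stepA cs) (gs0, [])
    let ge := se.2 ++ (if PySem.List.pyGet? cs (-1) = some '?' then [PySem.List.len cs - 1] else [])
    ((se.1.zip ge).foldl
      (fun (d : PySem.Dict String Int) (p : Int × Int) =>
        let g := String.ofList (PySem.List.slice cs (some p.1) (some (p.2 + 2)))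
        if d.contains g then d.insert g (d.getD g 0 + 1) else d.insert g 1)
      PySem.Dict.empty).items

-- ===== PORT B =====
-- inner while-loop of Source B consuming one run: returns (position after the run, remaining chars)
def runEndB : List Char → Int → Int × List Char
  | [], i => (i, [])
  | c :: t, i => if c = '?' then runEndB t (i + 1) else (i, c :: t)

-- needed by scanB's termination proof
theorem runEndB_len : ∀ (t : List Char) (i : Int), (runEndB t i).2.length ≤ t.length := by
  intro t
  induction t with
  | nil => intro i; simp [runEndB]
  | cons c r ih =>
    intro i
    by_cases h : c = '?' <;> simp [runEndB, h]
    exact (ih (i + 1)).trans (by omega)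

-- outer while-loop of Source B (cs = the full row, second argument = the chars from position i)
def scanB (cs : List Char) : List Char → Int → PySem.Dict String Int → PySem.Dict String Int
  | [], _, d => d
  | c :: t, i, d =>
    if c = '?' then
      let p := runEndB t (i + 1)
      let g := String.ofList (PySem.List.slice cs (some (max 0 (i - 1))) (some (p.1 + 1)))
      scanB cs p.2 p.1 (d.insert g (d.getD g 0 + 1))
    else scanB cs t (i + 1) d
  termination_by t => t.length
  decreasing_by
  · have := runEndB_len t (i + 1)
    simpa using Nat.lt_succ_of_le this
  · simp

def get_question_groups_py_alt (row : String) : List (String × Int) :=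
  (scanB row.toList row.toList 0 PySem.Dict.empty).items

-- ===== PRECONDITION & SPEC =====
-- Pre_ excludes exactly the empty row, on which A's first subscript of row raises IndexError.
def Pre_get_question_groups_py (row : String) : Prop := row ≠ ""
instance (row : String) : Decidable (Pre_get_question_groups_py row) := by unfold Pre_get_question_groups_py; infer_instance
def pvWitness_get_question_groups_py : String := "?a??b"

def Spec_get_question_groups_py (row : String) (out : List (String × Int)) : Prop := out = get_question_groups_py_alt row
instance (row : String) (out : List (String × Int)) : Decidable (Spec_get_question_groups_py row out) := by unfold Spec_get_question_groups_py; infer_instance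

-- ===== CLAIM (what is proved, stated in full; the proofs are below) =====
def Claim_equal_get_question_groups_py : Prop := ∀ (row : String), Dom_get_question_groups_py row → Pre_get_question_groups_py row → Spec_get_question_groups_py row (get_question_groups_py row)

-- ===== LEMMAS AND PROOFS =====

-- A's start/end transitions, scanned with the previous character as state
def startsRec : Char → List Char → Int → List Int
  | _, [], _ => []
  | prev, c :: t, i => (if c = '?' ∧ prev ≠ '?' then [i - 1] else []) ++ startsRec c t (i + 1)

def endsRec : Char → List Char → Int → List Int
  | _, [], _ => []
  | prev, c :: t, i => (if c ≠ '?' ∧ prev = '?' then [i - 1] else []) ++ endsRec c t (i + 1)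

-- last character of prev :: t
def lastC : Char → List Char → Char
  | p, [] => p
  | _, c :: t => lastC c t

-- maximal '?' runs of t (positions from i) as (start, one-past-end) pairs
def runsR : List Char → Int → List (Int × Int)
  | [], _ => []
  | c :: t, i =>
    if c = '?' then
      let p := runEndB t (i + 1)
      (i, p.1) :: runsR p.2 p.1
    else runsR t (i + 1)
  termination_by t _ => t.length
  decreasing_by
  · have := runEndB_len t (i + 1)
    simpa using Nat.lt_succ_of_le this
  · simp

-- (run start, one-past-end) ↦ the (start index, last-'?' index) pair A's zip produces for that run
def shiftR (r : Int × Int) : Int × Int := (max 0 (r.1 - 1), r.2 - 1)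

-- B's per-run dict update, as a fold step over runsR
def stepDict (cs : List Char) (d : PySem.Dict String Int) (r : Int × Int) : PySem.Dict String Int :=
  let g := String.ofList (PySem.List.slice cs (some (max 0 (r.1 - 1))) (some (r.2 + 1)))
  d.insert g (d.getD g 0 + 1)

theorem pyGetD_mid (pre : List Char) (c : Char) (t : List Char) (d : Char) :
    PySem.List.pyGetD (pre ++ c :: t) ((pre.length : Int)) d = c := by
  simp [PySem.List.pyGetD_natCast, List.getD_eq_getElem?_getD]

-- A's enumerate loop computes startsRec/endsRec (appended to the state), scanning with prev = cs[idx-1]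
theorem loopA (cs : List Char) :
    ∀ (t pre : List Char) (c : Char) (S E : List Int), cs = pre ++ c :: t →
    (PySem.List.enumerate t ((pre.length : Int) + 1)).foldl (stepA cs) (S, E)
      = (S ++ startsRec c t ((pre.length : Int) + 1), E ++ endsRec c t ((pre.length : Int) + 1)) := by
  intro t
  induction t with
  | nil => intro pre c S E h; simp [PySem.List.enumerate, startsRec, endsRec]
  | cons d r ih =>
    intro pre c S E h
    rw [PySem.List.enumerate_cons, List.foldl_cons]
    have hstep : stepA cs (S, E) ((pre.length : Int) + 1, d)
        = (S ++ (if d = '?' ∧ c ≠ '?' then [(pre.length : Int) + 1 - 1] else []),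
           E ++ (if d ≠ '?' ∧ c = '?' then [(pre.length : Int) + 1 - 1] else [])) := by
      have h0 : ((pre.length : Int) + 1) ≠ 0 := by omega
      have hg : PySem.List.pyGetD cs ((pre.length : Int) + 1 - 1) ' ' = c := by
        have : (pre.length : Int) + 1 - 1 = (pre.length : Int) := by omega
        rw [this, h]; exact pyGetD_mid pre c (d :: r) ' '
      simp only [stepA, h0, if_false, hg]
      split_ifs with h1 h2 h2 <;> simp_all
    rw [hstep]
    have h2 : cs = (pre ++ [c]) ++ d :: r := by simp [h]
    have := ih (pre ++ [c]) d
      (S ++ (if d = '?' ∧ c ≠ '?' then [(pre.length : Int) + 1 - 1] else []))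
      (E ++ (if d ≠ '?' ∧ c = '?' then [(pre.length : Int) + 1 - 1] else [])) h2
    simp only [List.length_append, List.length_cons, List.length_nil] at this ⊢
    push_cast at this ⊢
    rw [this]
    simp [startsRec, endsRec, List.append_assoc]

-- the heart of the equivalence: A's zip of start/end transitions is B's run list, shifted.
-- closed part: prev is not '?'; open part: prev is '?' and x is the start value already recorded.
theorem core_lemma : ∀ (t : List Char) (i : Int),
    ((1 ≤ i → ∀ prev, prev ≠ '?' →
       (startsRec prev t i).zip (endsRec prev t i ++ (if lastC prev t = '?' then [i + (t.length : Int) - 1] else []))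
         = (runsR t i).map shiftR)
    ∧ (0 ≤ i → ∀ x : Int,
       (x :: startsRec '?' t i).zip (endsRec '?' t i ++ (if lastC '?' t = '?' then [i + (t.length : Int) - 1] else []))
         = (x, (runEndB t i).1 - 1) :: (runsR (runEndB t i).2 (runEndB t i).1).map shiftR)) := by
  intro t
  induction t with
  | nil =>
    intro i
    constructor
    · intro hi prev hprev
      simp [startsRec, endsRec, lastC, hprev, runsR]
    · intro hi x
      simp [startsRec, endsRec, lastC, runEndB, runsR]
  | cons c r ih =>
    intro i
    constructor
    · intro hi prev hprev
      by_cases hc : c = '?'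
      · -- a run opens at position i
        subst hc
        have hopen := (ih (i + 1)).2 (by omega) (i - 1)
        simp only [startsRec, endsRec, lastC, hprev, and_false, if_false, ite_false, not_true,
          List.nil_append, List.cons_append] at *
        rw [runsR]
        simp only [if_pos rfl]
        simp only [List.length_cons]
        push_cast
        rw [show i + ((r.length : Int) + 1) - 1 = (i + 1) + (r.length : Int) - 1 by ring]
        rw [if_pos (⟨trivial, hprev⟩ : True ∧ prev ≠ '?'), List.singleton_append]
        rw [hopen]
        simp only [List.map_cons, shiftR]
        congr 2
        omega
      · -- no transition
        have hclosed := (ih (i + 1)).1 (by omega) c hc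
        simp only [startsRec, endsRec, lastC, hc, hprev, and_true, and_false, false_and,
          if_false, ite_false, List.nil_append]
        rw [runsR]
        simp only [if_neg hc]
        simp only [List.length_cons]
        push_cast
        rw [show i + ((r.length : Int) + 1) - 1 = (i + 1) + (r.length : Int) - 1 by ring]
        exact hclosed
    · intro hi x
      by_cases hc : c = '?'
      · -- the open run continues
        subst hc
        have hopen := (ih (i + 1)).2 (by omega) x
        simp only [startsRec, endsRec, lastC, and_false, not_true, false_and, if_false,
          ite_false, List.nil_append] at *
        rw [runEndB]
        simp only [if_pos rfl]
        simp only [List.length_cons]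
        push_cast
        rw [show i + ((r.length : Int) + 1) - 1 = (i + 1) + (r.length : Int) - 1 by ring]
        exact hopen
      · -- the open run closes at position i - 1
        have hclosed := (ih (i + 1)).1 (by omega) c hc
        simp only [startsRec, endsRec, lastC, hc, and_true, false_and, if_false,
          List.nil_append]
        rw [runEndB]
        simp only [if_neg hc]
        simp only [List.length_cons]
        push_cast
        rw [show i + ((r.length : Int) + 1) - 1 = (i + 1) + (r.length : Int) - 1 by ring]
        rw [if_pos hc, List.singleton_append]
        rw [List.cons_append]
        rw [show (x :: startsRec c r (i + 1)).zip
              ((i - 1) :: (endsRec c r (i + 1) ++ if lastC c r = '?' then [i + 1 + (r.length : Int) - 1] else []))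
            = (x, i - 1) :: (startsRec c r (i + 1)).zip
              (endsRec c r (i + 1) ++ if lastC c r = '?' then [i + 1 + (r.length : Int) - 1] else []) from rfl]
        rw [hclosed]
        rw [runsR, if_neg hc]

-- B's scan is a fold of stepDict over the run list
theorem scanB_eq_foldl (cs : List Char) : ∀ (t : List Char) (i : Int) (d : PySem.Dict String Int),
    scanB cs t i d = (runsR t i).foldl (stepDict cs) d := by
  intro t i d
  induction t, i, d using scanB.induct cs with
  | case1 i d => simp [scanB, runsR]
  | case2 t i d p g ih =>
    rw [scanB, runsR]
    exact ih
  | case3 c t i d hc ih =>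
    rw [scanB, runsR]
    simp only [if_neg hc]
    exact ih

theorem getLast?_lastC : ∀ (t : List Char) (c : Char), (c :: t).getLast? = some (lastC c t) := by
  intro t
  induction t with
  | nil => intro c; simp [lastC]
  | cons d r ih => intro c; rw [List.getLast?_cons_cons, ih, lastC]

-- A's per-pair dict update applied to a shifted run equals B's stepDict
theorem stepA_dict_eq (cs : List Char) :
    (fun (d : PySem.Dict String Int) (r : Int × Int) =>
      (fun (d : PySem.Dict String Int) (p : Int × Int) =>
        let g := String.ofList (PySem.List.slice cs (some p.1) (some (p.2 + 2)))
        if d.contains g then d.insert g (d.getD g 0 + 1) else d.insert g 1) d (shiftR r))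
    = stepDict cs := by
  funext d r
  simp only [shiftR, stepDict]
  rw [show r.2 - 1 + 2 = r.2 + 1 by ring]
  by_cases h : (d.contains (String.ofList (PySem.List.slice cs (some (max 0 (r.1 - 1))) (some (r.2 + 1))))) = true
  · simp [h]
  · have h' := Bool.not_eq_true _ |>.mp h
    simp [h', PySem.Dict.getD_of_not_contains]

-- ===== VERDICT (by name: the statement is the Claim_ definition above) =====
theorem get_question_groups_py_spec : Claim_equal_get_question_groups_py := by
  intro row _ hpre
  unfold Spec_get_question_groups_py
  have hne : row.toList ≠ [] := by
    intro h
    exact hpre (by simpa using congrArg String.ofList h)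
  obtain ⟨c0, t, hct⟩ := List.exists_cons_of_ne_nil hne
  unfold get_question_groups_py get_question_groups_py_alt
  rw [hct]
  simp only [PySem.List.pyGet?_zero_cons]
  rw [PySem.List.enumerate_cons, List.foldl_cons]
  rw [show stepA (c0 :: t) ((if c0 = '?' then [(0:Int)] else []), ([] : List Int)) (0, c0)
        = ((if c0 = '?' then [(0:Int)] else []), ([] : List Int)) from by simp [stepA]]
  have hl := loopA (c0 :: t) t [] c0 (if c0 = '?' then [(0:Int)] else []) [] rfl
  simp only [List.length_nil, Nat.cast_zero, zero_add] at hl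
  rw [show (1:Int) = 0 + 1 from by norm_num] at hl
  rw [hl]
  rw [PySem.List.pyGet?_neg_one, getLast?_lastC]
  simp only [Option.some.injEq, PySem.List.len_eq, List.length_cons]
  rw [show ((t.length + 1 : Nat) : Int) - 1 = 1 + (t.length : Int) - 1 from by push_cast; ring]
  rw [scanB_eq_foldl]
  by_cases hc0 : c0 = '?'
  · subst hc0
    simp only [if_true, ite_true, List.singleton_append, List.nil_append]
    rw [show ((0:Int) + 1) = 1 from by norm_num]
    have hz := (core_lemma t 1).2 (by norm_num) 0
    rw [hz]
    rw [show ((0:Int), (runEndB t 1).1 - 1) = shiftR (0, (runEndB t 1).1) from by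
      simp [shiftR]]
    rw [← List.map_cons]
    rw [show runsR ('?' :: t) 0 = (0, (runEndB t 1).1) :: runsR (runEndB t 1).2 (runEndB t 1).1 from by
      rw [runsR]; norm_num]
    rw [List.foldl_map, stepA_dict_eq]
  · simp only [if_neg hc0, List.nil_append]
    rw [show ((0:Int) + 1) = 1 from by norm_num]
    have hz := (core_lemma t 1).1 (le_refl 1) c0 hc0
    rw [hz]
    rw [show runsR (c0 :: t) 0 = runsR t 1 from by rw [runsR, if_neg hc0]; norm_num]
    rw [List.foldl_map, stepA_dict_eq]
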